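-- pv_equiv track=rewrite | github.com/SeisSol/yateto | elastic.py | doTheStuff2
-- ===== SOURCE A (Python) =====
-- def allSubstrings(s):
--   L = len(s)
--   return [s[i:j+1] for i in range(L) for j in range(i,L)]
--
-- def splitByDistance(p):
--   L = len(p)
--   splits = [i+1 for x,y,i in zip(p[:-1], p[1:], range(L)) if y-x != 1]
--   return [p[i:j] for i,j in zip([0] + splits, splits + [L])]
--
-- def doTheStuff2(I, P, M, prune = False):
--   D = list()
--   indices = sorted([P[p] for p in I])
--   groups = splitByDistance(indices)
--   groupStrings = [''.join([M[p] for p in sorted(g)]) for g in groups]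
--   D = set([s for g in groupStrings for s in allSubstrings(g)])
--   if prune:
--     D = set([d for d in D if d[0] == M[0]])
--   return D
-- ===== SOURCE B (Python) =====
-- # B: one flat pass — join everything into one string, tag every character with the
-- # id of the contiguous index-run it came from, then take every (i, j) character pair
-- # whose tags agree; no splitting into group lists, no per-group substring helper.
-- def doTheStuff2(I, P, M, prune=False):
--     idx = sorted(P[p] for p in I)
--     S = ''.join(M[k] for k in idx)
--     gid = []
--     g = 0
--     prev = None
--     for k in idx:
--         if prev is not None and k - prev != 1:
--             g += 1
--         gid.extend([g] * len(M[k]))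
--         prev = k
--     D = {S[i:j + 1] for i in range(len(S)) for j in range(i, len(S)) if gid[i] == gid[j]}
--     if prune:
--         D = {d for d in D if d[0] == M[0]}
--     return D
-- ===== Notes on version B (the rewrite author's own statement) =====
-- stated objective: alternative
-- what changed: Instead of splitting the sorted indices into contiguous groups and enumerating substrings group by group, B joins everything into one flat string, tags each character with the id of the contiguous index-run it came from, and collects every character span whose endpoint tags agree.
import Mathlib
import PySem

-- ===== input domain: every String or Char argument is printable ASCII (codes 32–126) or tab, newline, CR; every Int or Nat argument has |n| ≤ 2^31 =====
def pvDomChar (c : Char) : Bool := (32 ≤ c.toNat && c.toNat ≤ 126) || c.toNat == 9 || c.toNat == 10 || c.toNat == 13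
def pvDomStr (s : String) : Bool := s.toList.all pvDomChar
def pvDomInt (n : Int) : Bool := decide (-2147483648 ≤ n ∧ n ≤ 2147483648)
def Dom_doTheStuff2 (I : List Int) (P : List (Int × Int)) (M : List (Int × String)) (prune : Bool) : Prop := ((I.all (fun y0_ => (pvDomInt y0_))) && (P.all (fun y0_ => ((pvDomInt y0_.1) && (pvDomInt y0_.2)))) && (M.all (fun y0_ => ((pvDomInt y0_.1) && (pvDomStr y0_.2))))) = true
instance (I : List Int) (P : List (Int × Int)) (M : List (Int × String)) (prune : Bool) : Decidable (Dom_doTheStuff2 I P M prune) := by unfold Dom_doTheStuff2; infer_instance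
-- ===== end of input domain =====

-- B replaces A's split-into-groups + per-group substring enumeration by one flat pass over a single
-- joined string whose characters are tagged with contiguous-run ids (objective: alternative, same cost).

-- ===== PORT A =====
def allSubstrings (s : String) : List String :=
  (PySem.List.pyRange 0 (PySem.Str.len s) 1).flatMap (fun i =>
    (PySem.List.pyRange i (PySem.Str.len s) 1).map (fun j =>
      PySem.Str.slice s (some i) (some (j + 1))))

-- the local list `splits` of splitByDistance, as a named helper
def pvSplits (p : List Int) : List Int :=
  (((PySem.List.slice p none (some (-1))).zip (PySem.List.slice p (some 1) none)).zip
      (PySem.List.pyRange 0 (p.length : Int) 1)).filterMap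
    (fun t => if t.1.2 - t.1.1 ≠ 1 then some (t.2 + 1) else none)

def splitByDistance (p : List Int) : List (List Int) :=
  (([0] ++ pvSplits p).zip (pvSplits p ++ [(p.length : Int)])).map
    (fun ij : Int × Int => PySem.List.slice p (some ij.1) (some ij.2))

def doTheStuff2 (I : List Int) (P : List (Int × Int)) (M : List (Int × String)) (prune : Bool) : List String :=
  let Pd := PySem.Dict.mk P
  let Md := PySem.Dict.mk M
  let indices := PySem.List.sorted (I.map (fun p => Pd.getD p 0)) (fun x => x) false
  let groups := splitByDistance indices
  let groupStrings := groups.map (fun g =>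
    PySem.Str.join "" ((PySem.List.sorted g (fun x => x) false).map (fun p => Md.getD p "")))
  let D := PySem.Set.ofList (groupStrings.flatMap (fun g => allSubstrings g))
  if prune then
    PySem.Set.ofList (D.filter (fun d =>
      (PySem.Str.pyGet? d 0).map (fun c => String.ofList [c]) == some (Md.getD 0 "")))
  else D

-- ===== PORT B =====
-- the body of B's gid-building for-loop, as a named step function
def pvGidStep (Md : PySem.Dict Int String) (st : Int × Option Int × List Int) (k : Int) :
    Int × Option Int × List Int :=
  let g : Int := match st.2.1 with
    | some q => if k - q ≠ 1 then st.1 + 1 else st.1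
    | none => st.1
  (g, some k, st.2.2 ++ List.replicate (PySem.Str.len (Md.getD k "")).toNat g)

def doTheStuff2_alt (I : List Int) (P : List (Int × Int)) (M : List (Int × String)) (prune : Bool) : List String :=
  let Pd := PySem.Dict.mk P
  let Md := PySem.Dict.mk M
  let idx := PySem.List.sorted (I.map (fun p => Pd.getD p 0)) (fun x => x) false
  let S := PySem.Str.join "" (idx.map (fun k => Md.getD k ""))
  let gid := (idx.foldl (pvGidStep Md) (0, none, [])).2.2
  let D := PySem.Set.ofList ((PySem.List.pyRange 0 (PySem.Str.len S) 1).flatMap (fun i =>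
    ((PySem.List.pyRange i (PySem.Str.len S) 1).filter (fun j =>
        PySem.List.pyGet? gid i == PySem.List.pyGet? gid j)).map
      (fun j => PySem.Str.slice S (some i) (some (j + 1)))))
  if prune then
    PySem.Set.ofList (D.filter (fun d =>
      (PySem.Str.pyGet? d 0).map (fun c => String.ofList [c]) == some (Md.getD 0 "")))
  else D

-- ===== PRECONDITION & SPEC =====
-- Pre_ excludes exactly the inputs on which the Python A raises a KeyError: a p in I missing from P,
-- an index P[p] missing from M, or (in the prune pass, reached only when the substring set is
-- nonempty, i.e. some mapped string is nonempty) key 0 missing from M.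
def Pre_doTheStuff2 (I : List Int) (P : List (Int × Int)) (M : List (Int × String)) (prune : Bool) : Prop :=
  (∀ p ∈ I, ((PySem.Dict.mk P).get? p).isSome = true) ∧
  (∀ p ∈ I, ((PySem.Dict.mk M).get? ((PySem.Dict.mk P).getD p 0)).isSome = true) ∧
  (prune = true →
    ((PySem.Dict.mk M).get? 0).isSome = true ∨
      ∀ p ∈ I, (PySem.Dict.mk M).getD ((PySem.Dict.mk P).getD p 0) "" = "")

instance (I : List Int) (P : List (Int × Int)) (M : List (Int × String)) (prune : Bool) : Decidable (Pre_doTheStuff2 I P M prune) := by unfold Pre_doTheStuff2; infer_instance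

def pvWitness_doTheStuff2 : List Int × (List (Int × Int)) × (List (Int × String)) × Bool :=
  ([0, 1], [(0, 3), (1, 4)], [(3, "ab"), (4, "c")], false)

def Spec_doTheStuff2 (I : List Int) (P : List (Int × Int)) (M : List (Int × String)) (prune : Bool) (out : List String) : Prop := out = doTheStuff2_alt I P M prune
instance (I : List Int) (P : List (Int × Int)) (M : List (Int × String)) (prune : Bool) (out : List String) : Decidable (Spec_doTheStuff2 I P M prune out) := by unfold Spec_doTheStuff2; infer_instance

-- ===== CLAIM (what is proved, stated in full; the proofs are below) =====
def Claim_equal_doTheStuff2 : Prop := ∀ (I : List Int) (P : List (Int × Int)) (M : List (Int × String)) (prune : Bool), Dom_doTheStuff2 I P M prune → Pre_doTheStuff2 I P M prune → Spec_doTheStuff2 I P M prune (doTheStuff2 I P M prune)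

-- ===== LEMMAS AND PROOFS =====

-- A's substrings of one string, on char lists, Nat-indexed
def subsC (t : List Char) : List (List Char) :=
  (List.range t.length).flatMap (fun i =>
    (List.range (t.length - i)).map (fun k => (t.drop i).take (k + 1)))

-- B's tag-filtered span enumeration, on char lists, Nat-indexed
def pairsB (cs : List Char) (gid : List Int) : List (List Char) :=
  (List.range cs.length).flatMap (fun i =>
    ((List.range (cs.length - i)).filter (fun k => gid[i]? == gid[i + k]?)).map
      (fun k => (cs.drop i).take (k + 1)))

-- run ids: one constant block per group string
def gidC : List (List Char) → Int → List Int
  | [], _ => []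
  | t :: r, g => List.replicate t.length g ++ gidC r (g + 1)

-- recursive form of splitByDistance
def splitRec1 : Int → List Int → List Int × List (List Int)
  | x, [] => ([x], [])
  | x, y :: rest =>
    let hs := splitRec1 y rest
    if y - x = 1 then (x :: hs.1, hs.2) else ([x], hs.1 :: hs.2)

def splitRec : List Int → List (List Int)
  | [] => [[]]
  | x :: xs => (splitRec1 x xs).1 :: (splitRec1 x xs).2

-- recursive form of B's gid loop after the first element
def gidRec (f : Int → Nat) : Int → Int → List Int → List Int
  | _, _, [] => []
  | g, q, k :: ks =>
    let g' := if k - q ≠ 1 then g + 1 else g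
    List.replicate (f k) g' ++ gidRec f g' k ks

-- per-key replicate blocks, grouped
def labelGid (f : Int → Nat) : Int → List (List Int) → List Int
  | _, [] => []
  | g, grp :: rest => grp.flatMap (fun k => List.replicate (f k) g) ++ labelGid f (g + 1) rest

theorem pyRange_succ_shift (n : Nat) :
    PySem.List.pyRange 0 ((n : Int) + 1) 1 = 0 :: (PySem.List.pyRange 0 (n : Int) 1).map (· + 1) := by
  rw [PySem.List.pyRange_one_cons (by omega)]
  congr 1
  rw [PySem.List.pyRange_one, PySem.List.pyRange_one]
  have h1 : ((n : Int) + 1 - (0 + 1)).toNat = n := by omega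
  have h2 : ((n : Int) - 0).toNat = n := by omega
  rw [h1, h2, List.map_map]
  exact List.map_congr_left (fun k _ => by simp; ring)

theorem pvSplits_cons (x y : Int) (rest : List Int) :
    pvSplits (x :: y :: rest) =
      (if y - x ≠ 1 then [1] else []) ++ (pvSplits (y :: rest)).map (· + 1) := by
  simp only [pvSplits, PySem.List.slice_to_neg_one, PySem.List.slice_from_one]
  have h1 : (x :: y :: rest).dropLast = x :: (y :: rest).dropLast := by
    simp [List.dropLast_cons_of_ne_nil]
  have hr : PySem.List.pyRange 0 ((x :: y :: rest).length : Int) 1 =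
      0 :: (PySem.List.pyRange 0 (((y :: rest).length : Int)) 1).map (· + 1) := by
    have : ((x :: y :: rest).length : Int) = (((y :: rest).length : Nat) : Int) + 1 := by
      push_cast [List.length_cons]; ring
    rw [this, pyRange_succ_shift]
  rw [h1, hr]
  simp only [List.tail_cons, List.zip_cons_cons, List.zip_map_right, List.filterMap_cons,
    List.filterMap_map]
  rw [List.map_filterMap]
  have htail : ∀ Z : List ((Int × Int) × Int),
      List.filterMap
        ((fun t : (Int × Int) × Int => if t.1.2 - t.1.1 ≠ 1 then some (t.2 + 1) else none) ∘
          Prod.map id (fun z : Int => z + 1)) Z =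
      List.filterMap
        (fun t : (Int × Int) × Int =>
          Option.map (fun z => z + 1) (if t.1.2 - t.1.1 ≠ 1 then some (t.2 + 1) else none)) Z := by
    intro Z
    congr 1
    funext t
    by_cases h : t.1.2 - t.1.1 = 1 <;> simp [h, Prod.map]
  rw [htail, ← List.map_filterMap]
  by_cases h : y - x = 1 <;> simp [h]

theorem pvSplits_nil : pvSplits [] = [] := by decide

theorem pvSplits_singleton (x : Int) : pvSplits [x] = [] := by
  simp [pvSplits, PySem.List.slice, PySem.List.clampIdx]

theorem pvSplits_pos (p : List Int) : ∀ z ∈ pvSplits p, 1 ≤ z := by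
  induction p with
  | nil => simp [pvSplits_nil]
  | cons x q ih =>
    cases q with
    | nil => simp [pvSplits_singleton]
    | cons y rest =>
      rw [pvSplits_cons]
      intro z hz
      rcases List.mem_append.mp hz with h | h
      · split_ifs at h <;> simp_all
      · obtain ⟨w, hw, rfl⟩ := List.mem_map.mp h
        have := ih w hw
        omega

theorem slice_shift (x : Int) (q : List Int) (a b : Int) (ha : 0 ≤ a) (hb : 0 ≤ b) :
    PySem.List.slice (x :: q) (some (a + 1)) (some (b + 1)) =
      PySem.List.slice q (some a) (some b) := by
  rw [PySem.List.slice_toNat _ (by omega) (by omega), PySem.List.slice_toNat _ ha hb]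
  have h1 : (a + 1).toNat = a.toNat + 1 := by omega
  have h2 : (b + 1).toNat = b.toNat + 1 := by omega
  rw [h1, h2, List.drop_succ_cons]
  congr 1
  omega

theorem splitByDistance_eq_splitRec (p : List Int) : splitByDistance p = splitRec p := by
  induction p with
  | nil => decide
  | cons x q ih =>
    cases q with
    | nil =>
      simp only [splitByDistance, pvSplits_singleton, splitRec, splitRec1]
      simp [PySem.List.slice_toNat]
    | cons y rest =>
      -- abbreviations
      set q := y :: rest with hq
      have hlen : ((x :: q).length : Int) = (q.length : Int) + 1 := by
        push_cast [List.length_cons]; ring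
      have hshift : ∀ l : List (Int × Int), (∀ ab ∈ l, 0 ≤ ab.1 ∧ 0 ≤ ab.2) →
          (l.map (fun ab : Int × Int => (ab.1 + 1, ab.2 + 1))).map
              (fun ij : Int × Int => PySem.List.slice (x :: q) (some ij.1) (some ij.2)) =
            l.map (fun ij : Int × Int => PySem.List.slice q (some ij.1) (some ij.2)) := by
        intro l hl
        rw [List.map_map]
        exact List.map_congr_left (fun ab hab => slice_shift x q ab.1 ab.2 (hl ab hab).1 (hl ab hab).2)
      have hmem : ∀ ab ∈ (0 :: pvSplits q).zip (pvSplits q ++ [(q.length : Int)]),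
          0 ≤ ab.1 ∧ 0 ≤ ab.2 := by
        intro ab hab
        have h1 := List.of_mem_zip hab
        constructor
        · rcases List.mem_cons.mp h1.1 with h | h
          · omega
          · have := pvSplits_pos q ab.1 h; omega
        · rcases List.mem_append.mp h1.2 with h | h
          · have := pvSplits_pos q ab.2 h; omega
          · simp at h; omega
      by_cases hgap : y - x = 1
      · -- merge case
        have hsp : pvSplits (x :: q) = (pvSplits q).map (· + 1) := by
          rw [hq, pvSplits_cons, if_neg (by omega)]
          rfl
        have hsr : splitRec (x :: q) = (x :: (splitRec1 y rest).1) :: (splitRec1 y rest).2 := by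
          simp only [hq, splitRec, splitRec1, if_pos hgap]
        have ihq : splitByDistance q = (splitRec1 y rest).1 :: (splitRec1 y rest).2 := by
          rw [ih, hq]; rfl
        rcases hs' : pvSplits q with _ | ⟨c, s''⟩
        · -- no inner splits: one single group
          have hgq : splitByDistance q = [PySem.List.slice q (some 0) (some (q.length : Int))] := by
            simp [splitByDistance, hs']
          have hq_whole : PySem.List.slice q (some 0) (some (q.length : Int)) = q := by
            rw [PySem.List.slice_toNat _ (by omega) (by omega)]
            simp
          have hcons := ihq.symm.trans hgq
          rw [hq_whole] at hcons
          injection hcons with hA hB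
          have hgp : splitByDistance (x :: q) =
              [PySem.List.slice (x :: q) (some 0) (some ((x :: q).length : Int))] := by
            simp [splitByDistance, hsp, hs']
          have hp_whole : PySem.List.slice (x :: q) (some 0) (some ((x :: q).length : Int)) = x :: q := by
            rw [PySem.List.slice_toNat _ (by omega) (by omega)]
            simp
          rw [hgp, hp_whole, hsr, hA, hB]
        · -- inner splits present: first group grows by x, rest shift
          have hc : 1 ≤ c := pvSplits_pos q c (by rw [hs']; exact List.mem_cons_self)
          have hzq : ([0] ++ pvSplits q).zip (pvSplits q ++ [(q.length : Int)]) =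
              (0, c) :: ((c :: s'').zip (s'' ++ [(q.length : Int)])) := by
            rw [hs']; rfl
          have htailmem : ∀ ab ∈ (c :: s'').zip (s'' ++ [(q.length : Int)]), 0 ≤ ab.1 ∧ 0 ≤ ab.2 := by
            intro ab hab
            exact hmem ab (by show ab ∈ ([0] ++ pvSplits q).zip (pvSplits q ++ [(q.length : Int)]); rw [hzq]; exact List.mem_cons_of_mem _ hab)
          have hzp : ([0] ++ pvSplits (x :: q)).zip (pvSplits (x :: q) ++ [((x :: q).length : Int)]) =
              (0, c + 1) :: ((c :: s'').zip (s'' ++ [(q.length : Int)])).map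
                (fun ab : Int × Int => (ab.1 + 1, ab.2 + 1)) := by
            rw [hsp, hs', hlen]
            simp only [List.map_cons, List.cons_append, List.nil_append, List.zip_cons_cons]
            congr 1
            have h2 : (s''.map (· + 1)) ++ [(q.length : Int) + 1] =
                (s'' ++ [(q.length : Int)]).map (· + 1) := by simp
            have h3 : (c + 1) :: s''.map (· + 1) = (c :: s'').map (· + 1) := rfl
            rw [h2, h3, List.zip_map]
            rfl
          have hfirstp : PySem.List.slice (x :: q) (some 0) (some (c + 1)) =
              x :: PySem.List.slice q (some 0) (some c) := by
            rw [PySem.List.slice_toNat _ (by omega) (by omega),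
              PySem.List.slice_toNat _ (by omega) (by omega)]
            have : (c + 1).toNat = c.toNat + 1 := by omega
            simp [this]
          have hgq2 : splitByDistance q = PySem.List.slice q (some 0) (some c) ::
              ((c :: s'').zip (s'' ++ [(q.length : Int)])).map
                (fun ij : Int × Int => PySem.List.slice q (some ij.1) (some ij.2)) := by
            simp only [splitByDistance, hzq, List.map_cons]
          rw [ihq] at hgq2
          simp only [splitByDistance, hzp, List.map_cons]
          rw [hshift _ htailmem, hfirstp, hsr]
          injection hgq2 with hA hB
          rw [← hA, ← hB]
      · -- new group case
        have hsp : pvSplits (x :: q) = 1 :: (pvSplits q).map (· + 1) := by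
          rw [hq, pvSplits_cons, if_pos hgap]
          rfl
        -- groups of x::q : (0,1) :: shifted zip of q's group bounds
        have hz : ([0] ++ pvSplits (x :: q)).zip (pvSplits (x :: q) ++ [((x :: q).length : Int)]) =
            (0, 1) :: ((0 :: pvSplits q).zip (pvSplits q ++ [(q.length : Int)])).map
              (fun ab : Int × Int => (ab.1 + 1, ab.2 + 1)) := by
          rw [hsp, hlen]
          simp only [List.cons_append, List.nil_append, List.zip_cons_cons]
          congr 1
          have h1 : (1 : Int) :: (pvSplits q).map (· + 1) = ((0 :: pvSplits q).map (· + 1)) := by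
            simp
          have h2 : (pvSplits q).map (· + 1) ++ [(q.length : Int) + 1] =
              (pvSplits q ++ [(q.length : Int)]).map (· + 1) := by
            simp
          rw [h1, h2, List.zip_map]
          rfl
        simp only [splitByDistance, hz, List.map_cons]
        rw [hshift _ hmem]
        have hfirst : PySem.List.slice (x :: q) (some 0) (some 1) = [x] := by
          rw [PySem.List.slice_toNat _ (by omega) (by omega)]
          rfl
        rw [hfirst]
        show [x] :: splitByDistance q = splitRec (x :: q)
        rw [ih, hq]
        simp only [splitRec, splitRec1, if_neg hgap]

theorem splitRec1_flatten (xs : List Int) : ∀ x : Int,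
    (splitRec1 x xs).1 ++ (splitRec1 x xs).2.flatten = x :: xs := by
  induction xs with
  | nil => intro x; rfl
  | cons y rest ih =>
    intro x
    simp only [splitRec1]
    by_cases h : y - x = 1 <;> simp [h, ih y]

theorem splitRec1_sorted (xs : List Int) : ∀ x : Int,
    (x :: xs).Pairwise (· ≤ ·) →
      (splitRec1 x xs).1.Pairwise (· ≤ ·) ∧
        ∀ g ∈ (splitRec1 x xs).2, g.Pairwise (· ≤ ·) := by
  induction xs with
  | nil => intro x _; exact ⟨List.pairwise_singleton _ _, by simp [splitRec1]⟩
  | cons y rest ih =>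
    intro x hp
    have hp' := hp.of_cons
    have hxy : ∀ z ∈ y :: rest, x ≤ z := fun z hz => List.rel_of_pairwise_cons hp hz
    obtain ⟨h1, h2⟩ := ih y hp'
    simp only [splitRec1]
    by_cases h : y - x = 1
    · rw [if_pos h]
      refine ⟨List.pairwise_cons.mpr ⟨fun z hz => ?_, h1⟩, h2⟩
      · have : z ∈ y :: rest := by
          have hfl := splitRec1_flatten rest y
          have : z ∈ (splitRec1 y rest).1 ++ (splitRec1 y rest).2.flatten :=
            List.mem_append.mpr (Or.inl hz)
          rw [hfl] at this
          exact this
        exact hxy z this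
    · simp only [if_neg h]
      refine ⟨List.pairwise_singleton _ _, ?_⟩
      intro g hg
      rcases List.mem_cons.mp hg with rfl | hg'
      · exact h1
      · exact h2 g hg'

theorem foldl_pvGidStep_acc (Md : PySem.Dict Int String) (ks : List Int) : ∀ (g : Int) (q : Int) (acc : List Int),
    (ks.foldl (pvGidStep Md) (g, some q, acc)).2.2 =
      acc ++ gidRec (fun k => (Md.getD k "").toList.length) g q ks := by
  induction ks with
  | nil => intro g q acc; simp [gidRec]
  | cons k ks ih =>
    intro g q acc
    simp only [List.foldl_cons, pvGidStep, gidRec]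
    have hlen : (PySem.Str.len (Md.getD k "")).toNat = (Md.getD k "").toList.length := by
      rw [PySem.Str.len_eq]; omega
    by_cases h : k - q = 1 <;> simp [h, hlen, ih, List.append_assoc]

theorem gidRec_eq_labelGid (f : Int → Nat) (xs : List Int) : ∀ (x : Int) (g : Int),
    List.replicate (f x) g ++ gidRec f g x xs =
      labelGid f g ((splitRec1 x xs).1 :: (splitRec1 x xs).2) := by
  induction xs with
  | nil => intro x g; simp [gidRec, labelGid, splitRec1]
  | cons y rest ih =>
    intro x g
    simp only [splitRec1, gidRec]
    by_cases h : y - x = 1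
    · rw [if_pos h]
      have hg' : (if y - x ≠ 1 then g + 1 else g) = g := by simp [h]
      rw [hg']
      have hih := ih y g
      simp only [labelGid, List.flatMap_cons, List.append_assoc] at hih ⊢
      rw [hih]
    · rw [if_neg h]
      have hg' : (if y - x ≠ 1 then g + 1 else g) = g + 1 := by simp [h]
      rw [hg']
      have hih := ih y (g + 1)
      simp only [labelGid, List.flatMap_cons, List.flatMap_nil, List.append_nil] at hih ⊢
      rw [← hih]

theorem foldl_pvGidStep (Md : PySem.Dict Int String) (idx : List Int) :
    (idx.foldl (pvGidStep Md) (0, none, [])).2.2 =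
      labelGid (fun k => (Md.getD k "").toList.length) 0 (splitRec idx) := by
  cases idx with
  | nil => rfl
  | cons x xs =>
    rw [List.foldl_cons]
    have hstep : pvGidStep Md (0, none, []) x =
        (0, some x, List.replicate ((Md.getD x "").toList.length) 0) := by
      simp [pvGidStep, PySem.Str.len_eq]
    rw [hstep, foldl_pvGidStep_acc]
    show _ = labelGid _ 0 ((splitRec1 x xs).1 :: (splitRec1 x xs).2)
    exact gidRec_eq_labelGid (fun k => (Md.getD k "").toList.length) xs x 0

theorem gidC_length (gs : List (List Char)) : ∀ g : Int, (gidC gs g).length = gs.flatten.length := by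
  induction gs with
  | nil => intro g; rfl
  | cons t r ih => intro g; simp [gidC, ih]

theorem gidC_le (gs : List (List Char)) : ∀ g : Int, ∀ z ∈ gidC gs g, g ≤ z := by
  induction gs with
  | nil => simp [gidC]
  | cons t r ih =>
    intro g z hz
    rcases List.mem_append.mp hz with h | h
    · have := List.eq_of_mem_replicate h; omega
    · have := ih (g + 1) z h; omega

theorem core_pairs (gs : List (List Char)) : ∀ g0 : Int,
    pairsB gs.flatten (gidC gs g0) = gs.flatMap subsC := by
  induction gs with
  | nil => intro g0; rfl
  | cons t r ih =>
    intro g0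
    set n := t.length with hn
    set R := r.flatten with hR
    set m := R.length with hm
    set gid' := gidC r (g0 + 1) with hgid'
    have hglen : gid'.length = m := by
      rw [hgid', hm, hR]; exact gidC_length r (g0 + 1)
    have hlen : (t ++ R).length = n + m := by rw [List.length_append]
    have hgidfull : gidC (t :: r) g0 = List.replicate n g0 ++ gid' := rfl
    -- lookups
    have hlookL : ∀ i : Nat, i < n → (List.replicate n g0 ++ gid')[i]? = some g0 := by
      intro i hi
      rw [List.getElem?_append_left (by simpa using hi), List.getElem?_replicate, if_pos hi]
    have hlookR : ∀ k : Nat, (List.replicate n g0 ++ gid')[n + k]? = gid'[k]? := by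
      intro k
      rw [List.getElem?_append_right (by simp), List.length_replicate]
      congr 1
      omega
    have hneq : ∀ k : Nat, k < m → ¬ ((some g0 : Option Int) == gid'[k]?) = true := by
      intro k hk hbeq
      have hk' : k < gid'.length := by omega
      have hs : gid'[k]? = some gid'[k] := List.getElem?_eq_getElem hk'
      rw [hs] at hbeq
      simp only [beq_iff_eq, Option.some.injEq] at hbeq
      have hmem : gid'[k] ∈ gid' := List.getElem_mem _
      have := gidC_le r (g0 + 1) gid'[k] hmem
      omega
    show pairsB (t ++ R) (List.replicate n g0 ++ gid') = subsC t ++ r.flatMap subsC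
    set gid := List.replicate n g0 ++ gid' with hgid
    rw [pairsB, hlen, List.range_add, List.flatMap_append]
    congr 1
    · -- part 1: spans starting inside t are exactly subsC t
      rw [subsC]
      apply List.flatMap_congr
      intro i hi
      have hilt : i < n := List.mem_range.mp hi
      have hsplit : n + m - i = (n - i) + m := by omega
      rw [hsplit, List.range_add, List.filter_append]
      have hfil1 : (List.range (n - i)).filter (fun k => gid[i]? == gid[i + k]?) =
          List.range (n - i) := by
        apply List.filter_eq_self.mpr
        intro k hk
        have hklt : k < n - i := List.mem_range.mp hk
        rw [hlookL i hilt, hlookL (i + k) (by omega)]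
        exact beq_self_eq_true _
      have hfil2 : ((List.range m).map (fun x => (n - i) + x)).filter
          (fun k => gid[i]? == gid[i + k]?) = [] := by
        rw [List.filter_map]
        have : (List.range m).filter ((fun k => gid[i]? == gid[i + k]?) ∘ (fun x => (n - i) + x)) = [] := by
          apply List.filter_eq_nil_iff.mpr
          intro k hk
          have hklt : k < m := List.mem_range.mp hk
          have hidx : i + ((n - i) + k) = n + k := by omega
          simp only [Function.comp_apply, hidx]
          rw [hlookL i hilt, hlookR k]
          exact fun hb => hneq k hklt hb
        rw [this]
        rfl
      rw [hfil1, hfil2, List.append_nil]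
      apply List.map_congr_left
      intro k hk
      have hklt : k < n - i := List.mem_range.mp hk
      rw [List.drop_append_of_le_length (by omega),
        List.take_append_of_le_length (by simp [List.length_drop]; omega)]
    · -- part 2: spans starting inside R are pairsB of the tail
      rw [List.flatMap_map, ← ih (g0 + 1), pairsB]
      apply List.flatMap_congr
      intro i' hi'
      have hilt : i' < m := List.mem_range.mp hi'
      have hsub : n + m - (n + i') = m - i' := by omega
      have hdrop : (t ++ R).drop (n + i') = R.drop i' := by
        rw [hn]; exact List.drop_length_add_append i'
      rw [hsub, hdrop]
      congr 1
      apply List.filter_congr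
      intro k hk
      have hidx : n + i' + k = n + (i' + k) := by omega
      rw [hlookR i', hidx, hlookR (i' + k)]

theorem replicate_flatMap (strL : Int → List Char) (grp : List Int) (g : Int) :
    grp.flatMap (fun k => List.replicate (strL k).length g) =
      List.replicate (grp.flatMap strL).length g := by
  induction grp with
  | nil => rfl
  | cons k ks ih =>
    simp only [List.flatMap_cons, ih, List.length_append, List.replicate_add]

theorem labelGid_eq_gidC (strL : Int → List Char) (groups : List (List Int)) : ∀ g : Int,
    labelGid (fun k => (strL k).length) g groups =
      gidC (groups.map (fun grp => grp.flatMap strL)) g := by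
  induction groups with
  | nil => intro g; rfl
  | cons grp rest ih =>
    intro g
    simp only [labelGid, List.map_cons, gidC, replicate_flatMap, ih]

theorem allSubstrings_eq (s : String) :
    allSubstrings s = (subsC s.toList).map String.ofList := by
  rw [allSubstrings, subsC, PySem.Str.len_eq, PySem.List.pyRange_zero_natCast,
    List.flatMap_map, List.map_flatMap]
  apply List.flatMap_congr
  intro i _
  rw [PySem.List.pyRange_one, List.map_map, List.map_map]
  have ht : ((s.toList.length : Int) - i).toNat = s.toList.length - i := by omega
  rw [ht]
  apply List.map_congr_left
  intro k _
  show PySem.Str.slice s (some (i : Int)) (some ((i : Int) + (k : Int) + 1)) =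
    String.ofList ((s.toList.drop i).take (k + 1))
  apply String.toList_inj.mp
  rw [PySem.Str.toList_slice, String.toList_ofList, PySem.Chars.slice_eq_listSlice]
  have hb : ((i : Int) + (k : Int) + 1) = ((i : Int) + ((k + 1 : Nat) : Int)) := by push_cast; ring
  rw [hb, PySem.List.slice_natCast_add]

theorem join_empty_sep (l : List String) :
    PySem.Str.join "" l = String.ofList (l.map String.toList).flatten := by
  apply String.toList_inj.mp
  rw [PySem.Str.toList_join, String.toList_ofList]
  show List.intercalate [] _ = _
  generalize l.map String.toList = ps
  induction ps with
  | nil => simp [List.intercalate]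
  | cons a t ih =>
    cases t with
    | nil => simp [List.intercalate]
    | cons b u =>
      simp only [List.intercalate, List.intersperse] at ih ⊢
      simp_all [List.flatten]

theorem altD_eq (S : String) (gid : List Int) :
    (PySem.List.pyRange 0 (PySem.Str.len S) 1).flatMap (fun i =>
        ((PySem.List.pyRange i (PySem.Str.len S) 1).filter (fun j =>
            PySem.List.pyGet? gid i == PySem.List.pyGet? gid j)).map
          (fun j => PySem.Str.slice S (some i) (some (j + 1)))) =
      (pairsB S.toList gid).map String.ofList := by
  rw [pairsB, PySem.Str.len_eq, PySem.List.pyRange_zero_natCast, List.flatMap_map,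
    List.map_flatMap]
  apply List.flatMap_congr
  intro i _
  rw [PySem.List.pyRange_one, List.filter_map, List.map_map, List.map_map]
  have ht : ((S.toList.length : Int) - i).toNat = S.toList.length - i := by omega
  rw [ht]
  have hcond : ((fun j => PySem.List.pyGet? gid (i : Int) == PySem.List.pyGet? gid j) ∘
      (fun k : Nat => (i : Int) + k)) = fun k : Nat => gid[i]? == gid[i + k]? := by
    funext k
    have : (i : Int) + (k : Int) = ((i + k : Nat) : Int) := by push_cast; ring
    simp only [Function.comp_apply, this, PySem.List.pyGet?_natCast]
  rw [hcond]
  apply List.map_congr_left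
  intro k _
  show PySem.Str.slice S (some (i : Int)) (some ((i : Int) + (k : Int) + 1)) =
    String.ofList ((S.toList.drop i).take (k + 1))
  apply String.toList_inj.mp
  rw [PySem.Str.toList_slice, String.toList_ofList, PySem.Chars.slice_eq_listSlice]
  have hb : ((i : Int) + (k : Int) + 1) = ((i : Int) + ((k + 1 : Nat) : Int)) := by push_cast; ring
  rw [hb, PySem.List.slice_natCast_add]

theorem flatten_flatMap {α β : Type} (l : List (List α)) (f : α → List β) :
    l.flatten.flatMap f = l.flatMap (fun g => g.flatMap f) := by
  induction l with
  | nil => rfl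
  | cons a t ih => simp [ih]

-- the two substring lists agree for any dict M and any sorted index list
theorem lists_eq (Md : PySem.Dict Int String) (idx : List Int)
    (hpw : idx.Pairwise (· ≤ ·)) :
    ((splitByDistance idx).map (fun g =>
        PySem.Str.join "" ((PySem.List.sorted g (fun x => x) false).map
          (fun p => Md.getD p "")))).flatMap (fun g => allSubstrings g) =
      (PySem.List.pyRange 0
          (PySem.Str.len (PySem.Str.join "" (idx.map (fun k => Md.getD k "")))) 1).flatMap
        (fun i =>
          ((PySem.List.pyRange i
              (PySem.Str.len (PySem.Str.join "" (idx.map (fun k => Md.getD k "")))) 1).filter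
            (fun j =>
              PySem.List.pyGet? (idx.foldl (pvGidStep Md) (0, none, [])).2.2 i ==
                PySem.List.pyGet? (idx.foldl (pvGidStep Md) (0, none, [])).2.2 j)).map
            (fun j =>
              PySem.Str.slice (PySem.Str.join "" (idx.map (fun k => Md.getD k "")))
                (some i) (some (j + 1)))) := by
  rw [splitByDistance_eq_splitRec idx]
  set strL : Int → List Char := fun k => (Md.getD k "").toList with hstrL
  set groups := splitRec idx with hgroups
  set gs : List (List Char) := groups.map (fun grp => grp.flatMap strL) with hgs
  have hsorted : ∀ g ∈ groups, PySem.List.sorted g (fun x => x) false = g := by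
    intro g hg
    apply PySem.List.sorted_eq_self_of_pairwise
    cases idx with
    | nil =>
      have : g = [] := by simpa [hgroups, splitRec] using hg
      simp [this]
    | cons x xs =>
      obtain ⟨h1, h2⟩ := splitRec1_sorted xs x hpw
      rcases List.mem_cons.mp (by simpa [hgroups, splitRec] using hg) with rfl | h
      · exact h1
      · exact h2 g h
  have hflat : groups.flatten = idx := by
    cases idx with
    | nil => rfl
    | cons x xs => simpa [hgroups, splitRec] using splitRec1_flatten xs x
  have hmapA : groups.map (fun g =>
      PySem.Str.join "" ((PySem.List.sorted g (fun x => x) false).map (fun p => Md.getD p ""))) =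
      gs.map String.ofList := by
    rw [hgs, List.map_map]
    apply List.map_congr_left
    intro g hg
    rw [hsorted g hg, join_empty_sep, List.map_map]
    show String.ofList (g.map strL).flatten = _
    rw [← List.flatMap_def]
    rfl
  have hLHS : (gs.map String.ofList).flatMap (fun g => allSubstrings g) =
      (gs.flatMap subsC).map String.ofList := by
    rw [List.flatMap_map, List.map_flatMap]
    apply List.flatMap_congr
    intro t _
    rw [allSubstrings_eq, String.toList_ofList]
  have hS : PySem.Str.join "" (idx.map (fun k => Md.getD k "")) =
      String.ofList gs.flatten := by
    rw [join_empty_sep, List.map_map]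
    congr 1
    show (idx.map strL).flatten = _
    rw [← List.flatMap_def, ← hflat, flatten_flatMap, hgs, List.flatMap_def]
  have hgid : (idx.foldl (pvGidStep Md) (0, none, [])).2.2 = gidC gs 0 := by
    rw [foldl_pvGidStep, ← hgroups, hgs]
    exact labelGid_eq_gidC strL groups 0
  rw [hmapA, hLHS, hS, hgid, altD_eq, String.toList_ofList, core_pairs gs 0]

-- ===== VERDICT (by name: the statement is the Claim_ definition above) =====
theorem doTheStuff2_spec : Claim_equal_doTheStuff2 := by
  intro I P M prune _ _
  unfold Spec_doTheStuff2
  show doTheStuff2 I P M prune = doTheStuff2_alt I P M prune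
  simp only [doTheStuff2, doTheStuff2_alt]
  have hpw : (PySem.List.sorted (I.map (fun p => (PySem.Dict.mk P).getD p 0))
      (fun x => x) false).Pairwise (· ≤ ·) := by
    simpa using PySem.List.sorted_pairwise (I.map (fun p => (PySem.Dict.mk P).getD p 0)) (fun x => x)
  rw [lists_eq (PySem.Dict.mk M) _ hpw]
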